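-- pv_equiv track=rewrite | github.com/SDZZGNDRC/ComputerDesign | utils/asm.py | replace_label
-- ===== SOURCE A (Python) =====
-- from typing import Callable, List, Dict
--
-- def replace_label(inst: str, label_table: Dict[str, int], pc_next: int) -> str:
--     # 替换Label, 从长到短
--     inst_type = inst.split()[0]
--     new_inst = inst
--     if inst_type == 'beq' or inst_type == 'bne':
--         for label in sorted(label_table.keys(), key=lambda x: len(x), reverse=True):
--             if label in inst:
--                 offset = (label_table[label] - pc_next) >> 2
--                 offset_binary = offset & 0xFFFF  # 保留16位
--                 offset_hex = hex(offset_binary & 0xFFFF) # 转为十六进制形式，补齐4位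
--                 new_inst = inst.replace(label, offset_hex)
--                 break
--     elif inst_type == 'j':
--         for label in sorted(label_table.keys(), key=lambda x: len(x), reverse=True):
--             if label in inst:
--                 target_pc = bin(label_table[label])[2:].zfill(32)
--                 target = target_pc[4:30]
--                 new_inst = inst.replace(label, target)
--                 break
--     return new_inst
-- ===== SOURCE B (Python) =====
-- def replace_label(inst: str, label_table, pc_next: int) -> str:
--     # single unsorted pass: pick the longest matching label (first in dict
--     # order among equal lengths), then branch once on the instruction type
--     inst_type = inst.split()[0]
--     if inst_type not in ('beq', 'bne', 'j'):
--         return inst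
--     best = None
--     for label in label_table.keys():
--         if (best is None or len(label) > len(best)) and label in inst:
--             best = label
--     if best is None:
--         return inst
--     if inst_type == 'j':
--         target = bin(label_table[best])[2:].zfill(32)[4:30]
--         return inst.replace(best, target)
--     offset = (label_table[best] - pc_next) >> 2
--     return inst.replace(best, hex(offset & 0xFFFF))
-- ===== Notes on version B (the rewrite author's own statement) =====
-- stated objective: simpler
-- what changed: Replaces the two sort-then-scan-then-break loops (one per branch) by a single unsorted linear pass that keeps the strictly longest matching label (equal-length ties keep the first in dict order, matching the stable sort), and branches on the instruction type only once after the match.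
import Mathlib
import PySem

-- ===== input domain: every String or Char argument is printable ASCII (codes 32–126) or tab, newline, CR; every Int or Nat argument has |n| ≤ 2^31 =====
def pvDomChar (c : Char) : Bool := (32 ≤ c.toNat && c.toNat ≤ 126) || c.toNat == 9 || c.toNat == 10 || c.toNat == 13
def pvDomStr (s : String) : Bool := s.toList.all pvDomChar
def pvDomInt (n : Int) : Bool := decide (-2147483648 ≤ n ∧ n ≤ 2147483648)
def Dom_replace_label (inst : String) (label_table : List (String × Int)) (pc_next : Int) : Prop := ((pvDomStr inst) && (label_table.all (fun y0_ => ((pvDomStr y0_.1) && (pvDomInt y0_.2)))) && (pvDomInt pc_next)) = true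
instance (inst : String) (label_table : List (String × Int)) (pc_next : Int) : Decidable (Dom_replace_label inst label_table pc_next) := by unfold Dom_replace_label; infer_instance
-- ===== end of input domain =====

-- B's objective: simpler — one unsorted pass picking the longest matching label
-- (strict '>' keeps the first in dict order on ties, like A's stable sort),
-- then a single branch on the instruction type. Return-value equivalence only.

-- hex(n) for n ≥ 0 (exact there: "0x" + lowercase digits; A/B only apply it to n & 0xFFFF ≥ 0)
def pvHex (n : Int) : String := "0x" ++ String.ofList (Nat.toDigits 16 n.toNat)

-- new-instruction text for a chosen label, identical expressions in A and B
def pvBeqRepl (inst label : String) (v pc_next : Int) : String :=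
  let offset : Int := (v - pc_next) >>> 2
  let offset_binary : Int := PySem.Int.band offset 0xFFFF
  let offset_hex : String := pvHex (PySem.Int.band offset_binary 0xFFFF)
  PySem.Str.replace inst label offset_hex

def pvJRepl (inst label : String) (v : Int) : String :=
  let target_pc : List Char := PySem.Chars.zfill ((PySem.Int.pyBin v).toList.drop 2) 32
  let target : List Char := PySem.List.slice target_pc (some 4) (some 30)
  PySem.Str.replace inst label (String.ofList target)

-- ===== PORT A =====
-- the for-label loop of the 'beq'/'bne' branch: first substring match wins, then break
def pvLoopBeq (inst : String) (d : PySem.Dict String Int) (pc_next : Int) : List String → String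
  | [] => inst
  | l :: ls =>
    if PySem.Str.isIn l inst then pvBeqRepl inst l (d.getD l 0) pc_next
    else pvLoopBeq inst d pc_next ls

-- the for-label loop of the 'j' branch
def pvLoopJ (inst : String) (d : PySem.Dict String Int) : List String → String
  | [] => inst
  | l :: ls =>
    if PySem.Str.isIn l inst then pvJRepl inst l (d.getD l 0)
    else pvLoopJ inst d ls

def replace_label (inst : String) (label_table : List (String × Int)) (pc_next : Int) : String :=
  let d : PySem.Dict String Int := PySem.Dict.ofList label_table
  let inst_type : String := (PySem.Str.split₀ inst).headD ""   -- [0]: IndexError excluded by Pre_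
  if inst_type = "beq" ∨ inst_type = "bne" then
    pvLoopBeq inst d pc_next (PySem.List.sorted d.keys (fun x => x.length) true)
  else if inst_type = "j" then
    pvLoopJ inst d (PySem.List.sorted d.keys (fun x => x.length) true)
  else inst

-- ===== PORT B =====
-- single pass over the (unsorted) keys, keeping the strictly longest matching label
def pvBestLabel (inst : String) (ks : List String) : Option String :=
  ks.foldl
    (fun best l =>
      if (best.isNone || decide ((best.getD "").length < l.length)) && PySem.Str.isIn l inst
      then some l else best)
    none

def replace_label_alt (inst : String) (label_table : List (String × Int)) (pc_next : Int) : String :=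
  let d : PySem.Dict String Int := PySem.Dict.ofList label_table
  let inst_type : String := (PySem.Str.split₀ inst).headD ""   -- [0]: IndexError excluded by Pre_
  if inst_type ≠ "beq" ∧ inst_type ≠ "bne" ∧ inst_type ≠ "j" then inst
  else
    match pvBestLabel inst d.keys with
    | none => inst
    | some best =>
      if inst_type = "j" then pvJRepl inst best (d.getD best 0)
      else pvBeqRepl inst best (d.getD best 0) pc_next

-- ===== PRECONDITION & SPEC =====
-- Pre_ excludes exactly the empty/whitespace-only inst, where A's inst.split()[0] raises IndexError
def Pre_replace_label (inst : String) (label_table : List (String × Int)) (pc_next : Int) : Prop :=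
  PySem.Str.split₀ inst ≠ []
instance (inst : String) (label_table : List (String × Int)) (pc_next : Int) : Decidable (Pre_replace_label inst label_table pc_next) := by unfold Pre_replace_label; infer_instance

def pvWitness_replace_label : String × (List (String × Int)) × Int := ("beq $1, $2, L1", [("L1", 8)], 4)

def Spec_replace_label (inst : String) (label_table : List (String × Int)) (pc_next : Int) (out : String) : Prop := out = replace_label_alt inst label_table pc_next
instance (inst : String) (label_table : List (String × Int)) (pc_next : Int) (out : String) : Decidable (Spec_replace_label inst label_table pc_next out) := by unfold Spec_replace_label; infer_instance

-- ===== CLAIM (what is proved, stated in full; the proofs are below) =====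
def Claim_equal_replace_label : Prop := ∀ (inst : String) (label_table : List (String × Int)) (pc_next : Int), Dom_replace_label inst label_table pc_next → Pre_replace_label inst label_table pc_next → Spec_replace_label inst label_table pc_next (replace_label inst label_table pc_next)

-- ===== LEMMAS AND PROOFS =====

-- the label A's loops select: the first substring match in the given order
def pvFirstMatch (inst : String) : List String → Option String
  | [] => none
  | l :: ls => if PySem.Str.isIn l inst then some l else pvFirstMatch inst ls

theorem pvLoopBeq_eq (inst : String) (d : PySem.Dict String Int) (pc_next : Int)
    (ls : List String) :
    pvLoopBeq inst d pc_next ls =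
      match pvFirstMatch inst ls with
      | none => inst
      | some l => pvBeqRepl inst l (d.getD l 0) pc_next := by
  induction ls with
  | nil => rfl
  | cons l ls ih =>
    simp only [pvLoopBeq, pvFirstMatch]
    split <;> simp [ih]

theorem pvLoopJ_eq (inst : String) (d : PySem.Dict String Int)
    (ls : List String) :
    pvLoopJ inst d ls =
      match pvFirstMatch inst ls with
      | none => inst
      | some l => pvJRepl inst l (d.getD l 0) := by
  induction ls with
  | nil => rfl
  | cons l ls ih =>
    simp only [pvLoopJ, pvFirstMatch]
    split <;> simp [ih]

-- one step of B's fold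
def pvStep (inst : String) (best : Option String) (l : String) : Option String :=
  if (best.isNone || decide ((best.getD "").length < l.length)) && PySem.Str.isIn l inst
  then some l else best

theorem pvFirstMatch_mem {inst z : String} : ∀ {ls : List String},
    pvFirstMatch inst ls = some z → z ∈ ls := by
  intro ls
  induction ls with
  | nil => simp [pvFirstMatch]
  | cons w ws ih =>
    simp only [pvFirstMatch]
    split
    · intro h; simp_all
    · intro h; exact List.mem_cons_of_mem _ (ih h)

-- inserting x into a descending-by-length list: the first match is updated by pvStep
theorem pvFirstMatch_insertBy (inst x : String) (ls : List String)
    (hs : ls.Pairwise (fun a b => b.length ≤ a.length)) :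
    pvFirstMatch inst (PySem.List.insertBy (fun a b => decide (b.length < a.length)) x ls) =
      pvStep inst (pvFirstMatch inst ls) x := by
  induction ls with
  | nil =>
    by_cases hx : PySem.Chars.isIn x.toList inst.toList = true <;>
      simp [PySem.List.insertBy, pvFirstMatch, pvStep, hx]
  | cons y ys ih =>
    have hy : ∀ z ∈ ys, z.length ≤ y.length := fun z hz => (List.pairwise_cons.mp hs).1 z hz
    have hs' : ys.Pairwise (fun a b => b.length ≤ a.length) := (List.pairwise_cons.mp hs).2
    simp only [PySem.List.insertBy]
    by_cases hlt : y.length < x.length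
    · rw [if_pos (by simp [hlt])]
      by_cases hx : PySem.Chars.isIn x.toList inst.toList = true
      · have hL : pvFirstMatch inst (x :: y :: ys) = some x := by
          simp [pvFirstMatch, hx]
        rw [hL]
        cases hfm : pvFirstMatch inst (y :: ys) with
        | none => simp [pvStep, hx]
        | some z =>
          have hzy : z.length ≤ y.length := by
            rcases List.mem_cons.mp (pvFirstMatch_mem hfm) with h | h
            · simp [h]
            · exact hy z h
          simp [pvStep, hx, show z.length < x.length by omega]
      · have hL : pvFirstMatch inst (x :: y :: ys) = pvFirstMatch inst (y :: ys) := by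
          simp [pvFirstMatch, hx]
        rw [hL]
        simp [pvStep, hx]
    · rw [if_neg (by simp [hlt])]
      by_cases hyi : PySem.Chars.isIn y.toList inst.toList = true
      · have hL : pvFirstMatch inst
            (y :: PySem.List.insertBy (fun a b => decide (b.length < a.length)) x ys) = some y := by
          simp [pvFirstMatch, hyi]
        rw [hL]
        have hR : pvFirstMatch inst (y :: ys) = some y := by simp [pvFirstMatch, hyi]
        rw [hR]
        simp [pvStep, hlt]
      · have hL : pvFirstMatch inst
            (y :: PySem.List.insertBy (fun a b => decide (b.length < a.length)) x ys) =
            pvFirstMatch inst (PySem.List.insertBy (fun a b => decide (b.length < a.length)) x ys) := by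
          simp [pvFirstMatch, hyi]
        have hR : pvFirstMatch inst (y :: ys) = pvFirstMatch inst ys := by
          simp [pvFirstMatch, hyi]
        rw [hL, hR]
        exact ih hs'

-- B's fold over ks equals A's first-match over the descending stable sort of ks
theorem pvBestLabel_eq_firstMatch_sorted (inst : String) (ks : List String) :
    pvBestLabel inst ks =
      pvFirstMatch inst (PySem.List.sorted ks (fun x => x.length) true) := by
  rw [PySem.List.sorted_rev_eq_foldl_insertBy]
  induction ks using List.reverseRecOn with
  | nil => rfl
  | append_singleton ks x ih =>
    have hsorted : (List.foldl
        (fun acc x => PySem.List.insertBy (fun a b : String => decide (b.length < a.length)) x acc)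
        [] ks).Pairwise (fun a b => b.length ≤ a.length) := by
      have := PySem.List.sorted_pairwise_rev ks (fun x : String => x.length)
      rw [PySem.List.sorted_rev_eq_foldl_insertBy] at this
      exact this
    simp only [pvBestLabel] at ih ⊢
    rw [List.foldl_append, List.foldl_append, List.foldl_cons, List.foldl_nil,
      List.foldl_cons, List.foldl_nil,
      pvFirstMatch_insertBy _ _ _ hsorted, ← ih]
    rfl

-- ===== VERDICT (by name: the statement is the Claim_ definition above) =====
theorem replace_label_spec : Claim_equal_replace_label := by
  intro inst label_table pc_next _hdom _hpre
  unfold Spec_replace_label replace_label replace_label_alt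
  set d := PySem.Dict.ofList label_table with hd
  set t := (PySem.Str.split₀ inst).headD "" with ht
  by_cases hb : t = "beq" ∨ t = "bne"
  · have hbj : ¬ (t ≠ "beq" ∧ t ≠ "bne" ∧ t ≠ "j") := by tauto
    have hj : t ≠ "j" := by rcases hb with h | h <;> simp [h]
    rw [if_pos hb, if_neg hbj, pvLoopBeq_eq, ← pvBestLabel_eq_firstMatch_sorted]
    cases pvBestLabel inst d.keys with
    | none => rfl
    | some best => simp [hj]
  · by_cases hjj : t = "j"
    · have hbj : ¬ (t ≠ "beq" ∧ t ≠ "bne" ∧ t ≠ "j") := by tauto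
      rw [if_neg hb, if_pos hjj, if_neg hbj, pvLoopJ_eq, ← pvBestLabel_eq_firstMatch_sorted]
      cases pvBestLabel inst d.keys with
      | none => rfl
      | some best => simp [hjj]
    · have hbj : t ≠ "beq" ∧ t ≠ "bne" ∧ t ≠ "j" := by tauto
      rw [if_neg hb, if_neg hjj, if_pos hbj]
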